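-- pv_equiv track=rewrite | github.com/CvanderStoep/adventofcode2025 | day7.py | process_manifold_bfs
-- ===== SOURCE A (Python) =====
-- from collections import deque, defaultdict
--
-- def process_manifold_bfs(manifold: list) -> int:
--     """
--     Traverse the manifold using a breadth‑first search to identify all splitter
--     cells that can be reached from the start position.
--
--     Behavior:
--         - The start position 'S' is located on the top row.
--         - From each cell, the search moves one row downward.
--         - A '.' cell continues straight down.
--         - Any other character is treated as a splitter: it is recorded, and the
--           search branches diagonally left and/or right when those positions are
--           within bounds.
--
--     Notes:
--         - A `visited` set prevents revisiting coordinates, keeping the BFS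
--           efficient and avoiding exponential growth.
--         - The function does not count paths; it counts how many distinct
--           splitter cells are reachable.
--
--     Method:
--         1. Initialize BFS from the start coordinate.
--         2. For each reachable cell, inspect the cell directly below.
--         3. Continue straight or branch depending on the cell type.
--         4. Track all splitter coordinates encountered.
--         5. Return the number of unique splitter cells reached.
--
--     Args:
--         manifold (list): A 2D grid of characters representing the puzzle input.
--
--     Returns:
--         int: Number of distinct splitter cells reachable from the start.
--     """
--     # Find start position
--     start_x = manifold[0].index('S')
--     start = (start_x, 0)
--
--     height = len(manifold)
--     width = len(manifold[0])
--
--     queue = deque([start])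
--     visited = set()
--     splitter = set()
--
--     while queue:
--         x, y = queue.popleft()
--
--         if (x, y) in visited:
--             continue
--         visited.add((x, y))
--
--         ny = y + 1
--         if ny >= height:
--             continue
--
--         cell = manifold[ny][x]
--
--         if cell == '.':
--             queue.append((x, ny))
--         else:
--             splitter.add((x, ny))
--
--             # Only enqueue valid x positions
--             if x > 0:
--                 queue.append((x - 1, ny))
--             if x < width - 1:
--                 queue.append((x + 1, ny))
--
--     return len(splitter)
-- ===== SOURCE B (Python) =====
-- def process_manifold_bfs(manifold: list) -> int:
--     """Row-by-row sweep: since the beam only moves downward, keep a set of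
--     active columns per row instead of a BFS queue, and count splitter hits."""
--     width = len(manifold[0])
--     frontier = {manifold[0].index('S')}
--     count = 0
--     for row in manifold[1:]:
--         nxt = set()
--         for x in frontier:
--             if row[x] == '.':
--                 nxt.add(x)
--             else:
--                 count += 1
--                 if x > 0:
--                     nxt.add(x - 1)
--                 if x < width - 1:
--                     nxt.add(x + 1)
--         frontier = nxt
--     return count
-- ===== Notes on version B (the rewrite author's own statement) =====
-- stated objective: alternative
-- what changed: Replaces the deque-BFS with global visited/splitter coordinate-pair sets by a row-by-row sweep that carries only a set of active columns and an integer counter, exploiting that the beam moves strictly downward.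
-- outside the precondition, e.g. on process_manifold_bfs(['S..', '..']): A returns 0, B returns 0
import Mathlib
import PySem

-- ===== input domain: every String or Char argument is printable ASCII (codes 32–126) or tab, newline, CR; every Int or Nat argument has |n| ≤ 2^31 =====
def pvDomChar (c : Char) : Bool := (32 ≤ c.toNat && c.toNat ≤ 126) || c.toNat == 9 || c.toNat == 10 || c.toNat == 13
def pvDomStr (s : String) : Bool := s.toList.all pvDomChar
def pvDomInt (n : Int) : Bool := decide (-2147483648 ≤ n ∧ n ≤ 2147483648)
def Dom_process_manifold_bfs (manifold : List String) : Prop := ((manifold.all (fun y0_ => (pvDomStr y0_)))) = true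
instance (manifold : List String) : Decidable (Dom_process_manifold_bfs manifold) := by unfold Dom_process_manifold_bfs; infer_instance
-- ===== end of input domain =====

-- B replaces A's deque-BFS with visited/splitter pair-sets by a row-by-row sweep
-- of a set of active columns with a running counter (alternative decomposition).

-- ===== PORT A =====
-- while-loop of A: deque as a list (popleft = head, append = back).  `fuel` only
-- makes the loop structurally total; under Pre_ it is never exhausted (proved in
-- the lemmas below).  Where Python raises IndexError on a grid access (excluded
-- by Pre_) the port returns the current splitter set.
def pvLoopA (manifold : List String) (height width : Int) :
    Nat → List (Int × Int) → PySem.Set (Int × Int) → PySem.Set (Int × Int) →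
      PySem.Set (Int × Int)
  | 0, _, _, splitter => splitter
  | _ + 1, [], _, splitter => splitter
  | fuel + 1, (x, y) :: rest, visited, splitter =>
    if (x, y) ∈ visited then
      pvLoopA manifold height width fuel rest visited splitter
    else
      let visited' := PySem.Set.add visited (x, y)
      let ny := y + 1
      if height ≤ ny then
        pvLoopA manifold height width fuel rest visited' splitter
      else
        match PySem.List.pyGet? manifold ny with
        | none => splitter        -- IndexError (excluded by Pre_)
        | some row =>
          match PySem.Str.pyGet? row x with
          | none => splitter      -- IndexError (excluded by Pre_)
          | some cell =>
            if cell = '.' then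
              pvLoopA manifold height width fuel (rest ++ [(x, ny)]) visited' splitter
            else
              pvLoopA manifold height width fuel
                (rest ++ ((if 0 < x then [(x - 1, ny)] else []) ++
                          (if x < width - 1 then [(x + 1, ny)] else [])))
                visited' (PySem.Set.add splitter (x, ny))

def process_manifold_bfs (manifold : List String) : Int :=
  match manifold with
  | [] => 0            -- manifold[0]: IndexError (excluded by Pre_)
  | row0 :: _ =>
    -- str.index('S') of a 1-char needle = first index of the char; none = ValueError (excluded by Pre_)
    match PySem.List.index? row0.toList 'S' with
    | none => 0
    | some start_x =>
      let height : Int := manifold.length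
      let width : Int := row0.toList.length
      PySem.Set.len
        (pvLoopA manifold height width
          ((2 * row0.toList.length + 1) * (manifold.length + 1) + 1)
          [((start_x : Int), 0)] PySem.Set.empty PySem.Set.empty)

-- ===== PORT B =====
-- body of B's inner `for x in frontier` loop (order-independent: it only builds
-- a set and adds to a counter)
def pvRowStep (width : Int) (row : String) (acc : PySem.Set Int × Int) (x : Int) :
    PySem.Set Int × Int :=
  match PySem.Str.pyGet? row x with
  | none => acc        -- IndexError (excluded by Pre_)
  | some c =>
    if c = '.' then (PySem.Set.add acc.1 x, acc.2)
    else
      let s1 := if 0 < x then PySem.Set.add acc.1 (x - 1) else acc.1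
      let s2 := if x < width - 1 then PySem.Set.add s1 (x + 1) else s1
      (s2, acc.2 + 1)

-- `for row in manifold[1:]` of B
def pvSweep (width : Int) : List String → PySem.Set Int → Int → Int
  | [], _, count => count
  | row :: rows, frontier, count =>
    let st := frontier.foldl (pvRowStep width row) (PySem.Set.empty, count)
    pvSweep width rows st.1 st.2

def process_manifold_bfs_alt (manifold : List String) : Int :=
  match manifold with
  | [] => 0            -- manifold[0]: IndexError (excluded by Pre_)
  | row0 :: rest =>    -- manifold[1:] = rest
    match PySem.List.index? row0.toList 'S' with
    | none => 0        -- ValueError (excluded by Pre_)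
    | some sx =>
      pvSweep (row0.toList.length : Int) rest (PySem.Set.ofList [((sx : Nat) : Int)]) 0

-- ===== PRECONDITION & SPEC =====
-- Pre_ asks for a nonempty grid whose top row contains 'S' (else Python raises
-- IndexError/ValueError) and in which no row is shorter than the top row: A raises
-- IndexError when the beam steps past the end of a short row, and this closed-form
-- condition over-approximates that reachability-dependent crash — it also excludes
-- some ragged grids on which A happens to return because the beam never reaches
-- the short row (B returns the same value there).
def Pre_process_manifold_bfs (manifold : List String) : Prop :=
  manifold ≠ [] ∧ 'S' ∈ (manifold.headI).toList ∧
    ∀ row ∈ manifold, (manifold.headI).toList.length ≤ row.toList.length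

instance (manifold : List String) : Decidable (Pre_process_manifold_bfs manifold) := by
  unfold Pre_process_manifold_bfs; infer_instance

def pvWitness_process_manifold_bfs : List String := ["S.", "^."]

def Spec_process_manifold_bfs (manifold : List String) (out : Int) : Prop :=
  out = process_manifold_bfs_alt manifold
instance (manifold : List String) (out : Int) : Decidable (Spec_process_manifold_bfs manifold out) := by
  unfold Spec_process_manifold_bfs; infer_instance

-- ===== CLAIM (what is proved, stated in full; the proofs are below) =====
def Claim_equal_process_manifold_bfs : Prop := ∀ (manifold : List String), Dom_process_manifold_bfs manifold → Pre_process_manifold_bfs manifold → Spec_process_manifold_bfs manifold (process_manifold_bfs manifold)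

-- ===== LEMMAS AND PROOFS =====

-- the character the Python reads at row[x] (total stand-in, used under in-range hypotheses)
def pvCell (row : String) (x : Int) : Char := (PySem.Str.pyGet? row x).getD '.'

-- the columns a processed column x activates in the next row
def pvTrans (w : Int) (c : Char) (x : Int) : List Int :=
  if c = '.' then [x]
  else (if 0 < x then [x - 1] else []) ++ (if x < w - 1 then [x + 1] else [])

-- pure mirror of what one row of A's BFS does to (next-queue, visited, splitter)
def pvRowA (row : String) (w y : Int) :
    List Int → List Int → PySem.Set (Int × Int) → PySem.Set (Int × Int) →
      List Int × PySem.Set (Int × Int) × PySem.Set (Int × Int)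
  | [], n, v, s => (n, v, s)
  | x :: p, n, v, s =>
    if (x, y) ∈ v then pvRowA row w y p n v s
    else
      pvRowA row w y p (n ++ pvTrans w (pvCell row x) x) (PySem.Set.add v (x, y))
        (if pvCell row x = '.' then s else PySem.Set.add s (x, y + 1))

-- the columns of p that row y actually processes (first occurrences, not yet visited)
def pvFresh (y : Int) : List Int → PySem.Set (Int × Int) → List Int
  | [], _ => []
  | x :: p, v =>
    if (x, y) ∈ v then pvFresh y p v
    else x :: pvFresh y p (PySem.Set.add v (x, y))

lemma pvCell_some (row : String) (x : Int) (h0 : 0 ≤ x)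
    (h1 : x < (row.toList.length : Int)) :
    PySem.Str.pyGet? row x = some (pvCell row x) := by
  have h1' : x.toNat < row.toList.length := by omega
  have h := PySem.List.pyGet?_eq_some_getElem row.toList h0 (by exact_mod_cast h1)
  simp [PySem.Str.pyGet?, PySem.Chars.pyGet?, pvCell, h]

lemma pvTrans_bounds (w x z : Int) (c : Char) (h0 : 0 ≤ x) (h1 : x < w)
    (hz : z ∈ pvTrans w c x) : 0 ≤ z ∧ z < w := by
  unfold pvTrans at hz
  split_ifs at hz <;> simp_all <;> omega

lemma pvTrans_length_le (w x : Int) (c : Char) : (pvTrans w c x).length ≤ 2 := by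
  unfold pvTrans
  split_ifs <;> simp

lemma pvNodup_length_le (l : List Int) (w : Int) (hnd : l.Nodup)
    (hb : ∀ x ∈ l, 0 ≤ x ∧ x < w) : l.length ≤ w.toNat := by
  classical
  have hsub : l.toFinset ⊆ Finset.Ico (0 : Int) w := by
    intro z hz
    rw [List.mem_toFinset] at hz
    have := hb z hz
    rw [Finset.mem_Ico]
    omega
  have h2 := Finset.card_le_card hsub
  rw [List.toFinset_card_of_nodup hnd, Int.card_Ico] at h2
  omega

-- ---- pvFresh facts ----
lemma pvFresh_not_mem (y : Int) : ∀ (p : List Int) (v : PySem.Set (Int × Int)) (x : Int),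
    (x, y) ∈ v → x ∉ pvFresh y p v := by
  intro p
  induction p with
  | nil => intro v x _; simp [pvFresh]
  | cons a p ih =>
    intro v x hv
    by_cases h : (a, y) ∈ v
    · rw [pvFresh, if_pos h]; exact ih v x hv
    · rw [pvFresh, if_neg h]
      have hxa : x ≠ a := fun he => h (he ▸ hv)
      simp only [List.mem_cons, not_or]
      exact ⟨hxa, ih _ x ((PySem.Set.mem_add v (a, y) (x, y)).mpr (Or.inl hv))⟩

lemma pvFresh_mem (y : Int) : ∀ (p : List Int) (v : PySem.Set (Int × Int)) (x : Int),
    x ∈ pvFresh y p v ↔ x ∈ p ∧ (x, y) ∉ v := by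
  intro p
  induction p with
  | nil => intro v x; simp [pvFresh]
  | cons a p ih =>
    intro v x
    by_cases h : (a, y) ∈ v
    · rw [pvFresh, if_pos h]
      rw [ih]
      constructor
      · rintro ⟨hp, hnv⟩; exact ⟨by simp [hp], hnv⟩
      · rintro ⟨hp, hnv⟩
        rcases List.mem_cons.mp hp with rfl | hp
        · exact absurd h hnv
        · exact ⟨hp, hnv⟩
    · rw [pvFresh, if_neg h]
      simp only [List.mem_cons, ih, PySem.Set.mem_add, Prod.mk.injEq]
      by_cases hxa : x = a
      · subst hxa; simp [h]
      · simp [hxa]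

lemma pvFresh_nodup (y : Int) : ∀ (p : List Int) (v : PySem.Set (Int × Int)),
    (pvFresh y p v).Nodup := by
  intro p
  induction p with
  | nil => intro v; simp [pvFresh]
  | cons a p ih =>
    intro v
    by_cases h : (a, y) ∈ v
    · rw [pvFresh, if_pos h]; exact ih v
    · rw [pvFresh, if_neg h]
      refine List.nodup_cons.mpr ⟨?_, ih _⟩
      exact pvFresh_not_mem y p _ a ((PySem.Set.mem_add v (a, y) (a, y)).mpr (Or.inr rfl))

-- ---- pvRowA facts ----
lemma pvRowA_out (row : String) (w y : Int) :
    ∀ (p n : List Int) (v s : PySem.Set (Int × Int)),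
      (pvRowA row w y p n v s).1
        = n ++ (pvFresh y p v).flatMap (fun x => pvTrans w (pvCell row x) x) := by
  intro p
  induction p with
  | nil => intro n v s; simp [pvRowA, pvFresh]
  | cons a p ih =>
    intro n v s
    by_cases h : (a, y) ∈ v
    · rw [pvRowA, if_pos h, pvFresh, if_pos h]; exact ih n v s
    · rw [pvRowA, if_neg h, pvFresh, if_neg h]
      rw [ih]
      simp [List.append_assoc]

lemma pvRowA_visited (row : String) (w y : Int) :
    ∀ (p n : List Int) (v s : PySem.Set (Int × Int)) (c : Int × Int),
      c ∈ (pvRowA row w y p n v s).2.1 → c ∈ v ∨ c.2 = y := by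
  intro p
  induction p with
  | nil => intro n v s c hc; exact Or.inl hc
  | cons a p ih =>
    intro n v s c hc
    by_cases h : (a, y) ∈ v
    · rw [pvRowA, if_pos h] at hc; exact ih n v s c hc
    · rw [pvRowA, if_neg h] at hc
      rcases ih _ _ _ c hc with hv | hy
      · rcases (PySem.Set.mem_add v (a, y) c).mp hv with hv | rfl
        · exact Or.inl hv
        · exact Or.inr rfl
      · exact Or.inr hy

lemma pvRowA_splitter_mem (row : String) (w y : Int) :
    ∀ (p n : List Int) (v s : PySem.Set (Int × Int)) (c : Int × Int),
      c ∈ (pvRowA row w y p n v s).2.2 → c ∈ s ∨ c.2 = y + 1 := by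
  intro p
  induction p with
  | nil => intro n v s c hc; exact Or.inl hc
  | cons a p ih =>
    intro n v s c hc
    by_cases h : (a, y) ∈ v
    · rw [pvRowA, if_pos h] at hc; exact ih n v s c hc
    · rw [pvRowA, if_neg h] at hc
      rcases ih _ _ _ c hc with hs | hy
      · by_cases hdot : pvCell row a = '.'
        · rw [if_pos hdot] at hs; exact Or.inl hs
        · rw [if_neg hdot] at hs
          rcases (PySem.Set.mem_add s (a, y + 1) c).mp hs with hs | rfl
          · exact Or.inl hs
          · exact Or.inr rfl
      · exact Or.inr hy

lemma pvRowA_splitter_len (row : String) (w y : Int) :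
    ∀ (p n : List Int) (v s : PySem.Set (Int × Int)),
      (∀ x' : Int, (x', y + 1) ∈ s → (x', y) ∈ v) →
      PySem.Set.len (pvRowA row w y p n v s).2.2
        = PySem.Set.len s
          + (((pvFresh y p v).filter (fun x => !(pvCell row x == '.'))).length : Int) := by
  intro p
  induction p with
  | nil => intro n v s _; simp [pvRowA, pvFresh]
  | cons a p ih =>
    intro n v s hs
    by_cases h : (a, y) ∈ v
    · rw [pvRowA, if_pos h, pvFresh, if_pos h]; exact ih n v s hs
    · rw [pvRowA, if_neg h, pvFresh, if_neg h]
      have hs' : ∀ x' : Int, (x', y + 1) ∈ s → (x', y) ∈ PySem.Set.add v (a, y) :=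
        fun x' hx' => (PySem.Set.mem_add v (a, y) (x', y)).mpr (Or.inl (hs x' hx'))
      by_cases hdot : pvCell row a = '.'
      · rw [if_pos hdot]
        rw [ih _ _ _ (by
          intro x' hx'
          exact (PySem.Set.mem_add v (a, y) (x', y)).mpr (Or.inl (hs x' hx')))]
        simp [hdot]
      · rw [if_neg hdot]
        have hnotin : (a, y + 1) ∉ s := fun hmem => h (hs a hmem)
        have hs'' : ∀ x' : Int, (x', y + 1) ∈ PySem.Set.add s (a, y + 1) →
            (x', y) ∈ PySem.Set.add v (a, y) := by
          intro x' hx'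
          rcases (PySem.Set.mem_add s (a, y + 1) (x', y + 1)).mp hx' with hx' | he
          · exact (PySem.Set.mem_add v (a, y) (x', y)).mpr (Or.inl (hs x' hx'))
          · have hxa : x' = a := by simpa using congrArg Prod.fst he
            exact (PySem.Set.mem_add v (a, y) (x', y)).mpr (Or.inr (by rw [hxa]))
        rw [ih _ _ _ hs'']
        rw [PySem.Set.add_of_not_mem hnotin]
        simp [PySem.Set.len, hdot]
        ring

-- ---- A's loop: skipping rows past the bottom, and one row of processing ----
lemma pvLoopA_stop (m : List String) (h w : Int) :
    ∀ (fuel : Nat) (q : List (Int × Int)) (v s : PySem.Set (Int × Int)),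
      (∀ e ∈ q, h ≤ e.2 + 1) → pvLoopA m h w fuel q v s = s := by
  intro fuel
  induction fuel with
  | zero => intro q v s _; rfl
  | succ f ih =>
    intro q v s hq
    rcases q with _ | ⟨⟨x, y⟩, rest⟩
    · rfl
    · have hy : h ≤ y + 1 := hq (x, y) (by simp)
      by_cases hv : (x, y) ∈ v
      · rw [pvLoopA, if_pos hv]
        exact ih rest v s (fun e he => hq e (by simp [he]))
      · rw [pvLoopA, if_neg hv]
        simp only [if_pos hy]
        exact ih rest _ s (fun e he => hq e (by simp [he]))

lemma pvLoopA_row (m : List String) (h w : Int) (row : String) (y : Int)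
    (hh : h = m.length)
    (hrow : PySem.List.pyGet? m (y + 1) = some row)
    (hw : w ≤ (row.toList.length : Int)) :
    ∀ (p n : List Int) (v s : PySem.Set (Int × Int)) (fuel : Nat),
      (∀ x ∈ p, 0 ≤ x ∧ x < w) →
      pvLoopA m h w (fuel + p.length)
          (p.map (fun x => (x, y)) ++ n.map (fun x => (x, y + 1))) v s
        = pvLoopA m h w fuel ((pvRowA row w y p n v s).1.map (fun x => (x, y + 1)))
            (pvRowA row w y p n v s).2.1 (pvRowA row w y p n v s).2.2 := by
  have hyh : y + 1 < h := by
    by_contra hcon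
    have hnone : PySem.List.pyGet? m (y + 1) = none := by
      rw [PySem.List.pyGet?_eq_none_iff]
      intro hin
      simp only [PySem.Raise.InRange] at hin
      omega
    rw [hnone] at hrow
    simp at hrow
  intro p
  induction p with
  | nil =>
    intro n v s fuel _
    simp [pvRowA]
  | cons x p ih =>
    intro n v s fuel hb
    have hx := hb x (by simp)
    have hcell : PySem.Str.pyGet? row x = some (pvCell row x) :=
      pvCell_some row x hx.1 (by have := hx.2; omega)
    have hq : (x :: p).map (fun x => (x, y)) ++ n.map (fun x => (x, y + 1))
        = (x, y) :: (p.map (fun x => (x, y)) ++ n.map (fun x => (x, y + 1))) := by simp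
    have hlen : fuel + (x :: p).length = (fuel + p.length) + 1 := by
      simp only [List.length_cons]
      omega
    rw [hq, hlen]
    by_cases hv : (x, y) ∈ v
    · rw [pvLoopA, if_pos hv, pvRowA, if_pos hv]
      exact ih n v s fuel (fun z hz => hb z (by simp [hz]))
    · rw [pvLoopA, if_neg hv]
      simp only [if_neg (by omega : ¬ h ≤ y + 1)]
      rw [pvRowA, if_neg hv]
      split
      · next heq => rw [hrow] at heq; simp at heq
      · next row' heq =>
        rw [hrow] at heq
        injection heq with heq'
        subst heq'
        split
        · next heq2 => rw [hcell] at heq2; simp at heq2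
        · next cell heq2 =>
          rw [hcell] at heq2
          injection heq2 with heq2'
          subst heq2'
          by_cases hdot : pvCell row x = '.'
          · rw [if_pos hdot, if_pos hdot]
            have harr : (p.map (fun x => (x, y)) ++ n.map (fun x => (x, y + 1))) ++ [(x, y + 1)]
                = p.map (fun x => (x, y))
                  ++ (n ++ pvTrans w (pvCell row x) x).map (fun x => (x, y + 1)) := by
              simp [pvTrans, hdot]
            rw [harr]
            exact ih _ _ _ fuel (fun z hz => hb z (by simp [hz]))
          · rw [if_neg hdot, if_neg hdot]
            have harr : (p.map (fun x => (x, y)) ++ n.map (fun x => (x, y + 1)))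
                  ++ ((if 0 < x then [(x - 1, y + 1)] else [])
                      ++ (if x < w - 1 then [(x + 1, y + 1)] else []))
                = p.map (fun x => (x, y))
                  ++ (n ++ pvTrans w (pvCell row x) x).map (fun x => (x, y + 1)) := by
              simp only [pvTrans, if_neg hdot, List.map_append, List.append_assoc]
              split_ifs <;> simp
            rw [harr]
            exact ih _ _ _ fuel (fun z hz => hb z (by simp [hz]))

-- ---- B's row fold ----
lemma pvSweepRow_count (w : Int) (row : String) (hw : w ≤ (row.toList.length : Int)) :
    ∀ (L : List Int) (S : PySem.Set Int) (c : Int),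
      (∀ x ∈ L, 0 ≤ x ∧ x < w) →
      (L.foldl (pvRowStep w row) (S, c)).2
        = c + ((L.filter (fun x => !(pvCell row x == '.'))).length : Int) := by
  intro L
  induction L with
  | nil => intro S c _; simp
  | cons a L ih =>
    intro S c hb
    have ha := hb a (by simp)
    have hcell : PySem.Str.pyGet? row a = some (pvCell row a) :=
      pvCell_some row a ha.1 (by have := ha.2; omega)
    rw [List.foldl_cons]
    by_cases hdot : pvCell row a = '.'
    · rw [show pvRowStep w row (S, c) a = (PySem.Set.add S a, c) by
        rw [pvRowStep, hcell]; simp [hdot]]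
      rw [ih _ _ (fun z hz => hb z (by simp [hz]))]
      simp [hdot]
    · rw [show pvRowStep w row (S, c) a
          = ((if a < w - 1
              then PySem.Set.add (if 0 < a then PySem.Set.add S (a - 1) else S) (a + 1)
              else (if 0 < a then PySem.Set.add S (a - 1) else S)), c + 1) by
        rw [pvRowStep, hcell]; simp [hdot]]
      rw [ih _ _ (fun z hz => hb z (by simp [hz]))]
      simp [hdot]
      ring

lemma pvSweepRow_mem (w : Int) (row : String) (hw : w ≤ (row.toList.length : Int)) :
    ∀ (L : List Int) (S : PySem.Set Int) (c : Int) (z : Int),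
      (∀ x ∈ L, 0 ≤ x ∧ x < w) →
      (z ∈ (L.foldl (pvRowStep w row) (S, c)).1
        ↔ z ∈ S ∨ ∃ x ∈ L, z ∈ pvTrans w (pvCell row x) x) := by
  intro L
  induction L with
  | nil => intro S c z _; simp
  | cons a L ih =>
    intro S c z hb
    have ha := hb a (by simp)
    have hcell : PySem.Str.pyGet? row a = some (pvCell row a) :=
      pvCell_some row a ha.1 (by have := ha.2; omega)
    rw [List.foldl_cons]
    by_cases hdot : pvCell row a = '.'
    · rw [show pvRowStep w row (S, c) a = (PySem.Set.add S a, c) by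
        rw [pvRowStep, hcell]; simp [hdot]]
      rw [ih _ _ _ (fun z hz => hb z (by simp [hz]))]
      simp only [PySem.Set.mem_add]
      have htrans : ∀ z : Int, z ∈ pvTrans w (pvCell row a) a ↔ z = a := by
        intro z; simp [pvTrans, hdot]
      constructor
      · rintro ((hS | hza) | ⟨b, hbL, hzb⟩)
        · exact Or.inl hS
        · exact Or.inr ⟨a, by simp, (htrans z).mpr hza⟩
        · exact Or.inr ⟨b, by simp [hbL], hzb⟩
      · rintro (hS | ⟨b, hbmem, hzb⟩)
        · exact Or.inl (Or.inl hS)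
        · rcases List.mem_cons.mp hbmem with rfl | hbL
          · exact Or.inl (Or.inr ((htrans z).mp hzb))
          · exact Or.inr ⟨b, hbL, hzb⟩
    · rw [show pvRowStep w row (S, c) a
          = ((if a < w - 1
              then PySem.Set.add (if 0 < a then PySem.Set.add S (a - 1) else S) (a + 1)
              else (if 0 < a then PySem.Set.add S (a - 1) else S)), c + 1) by
        rw [pvRowStep, hcell]; simp [hdot]]
      rw [ih _ _ _ (fun z hz => hb z (by simp [hz]))]
      have hmem : ∀ z : Int,
          (z ∈ (if a < w - 1
              then PySem.Set.add (if 0 < a then PySem.Set.add S (a - 1) else S) (a + 1)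
              else (if 0 < a then PySem.Set.add S (a - 1) else S))
            ↔ z ∈ S ∨ z ∈ pvTrans w (pvCell row a) a) := by
        intro z
        simp only [pvTrans, if_neg hdot]
        split_ifs <;> (simp [PySem.Set.mem_add]; try tauto)
      rw [hmem]
      constructor
      · rintro ((hS | ht) | ⟨b, hbL, hzb⟩)
        · exact Or.inl hS
        · exact Or.inr ⟨a, by simp, ht⟩
        · exact Or.inr ⟨b, by simp [hbL], hzb⟩
      · rintro (hS | ⟨b, hbmem, hzb⟩)
        · exact Or.inl (Or.inl hS)
        · rcases List.mem_cons.mp hbmem with rfl | hbL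
          · exact Or.inl (Or.inr hzb)
          · exact Or.inr ⟨b, hbL, hzb⟩

lemma pvSweepRow_nodup (w : Int) (row : String) :
    ∀ (L : List Int) (S : PySem.Set Int) (c : Int),
      S.Nodup → (L.foldl (pvRowStep w row) (S, c)).1.Nodup := by
  intro L
  induction L with
  | nil => intro S c h; exact h
  | cons a L ih =>
    intro S c hS
    rw [List.foldl_cons]
    rcases hget : PySem.Str.pyGet? row a with _ | cell
    · rw [show pvRowStep w row (S, c) a = (S, c) by rw [pvRowStep, hget]]
      exact ih _ _ hS
    · by_cases hdot : cell = '.'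
      · rw [show pvRowStep w row (S, c) a = (PySem.Set.add S a, c) by
          rw [pvRowStep, hget]; simp [hdot]]
        exact ih _ _ (PySem.Set.nodup_add S a hS)
      · rw [show pvRowStep w row (S, c) a
            = ((if a < w - 1
                then PySem.Set.add (if 0 < a then PySem.Set.add S (a - 1) else S) (a + 1)
                else (if 0 < a then PySem.Set.add S (a - 1) else S)), c + 1) by
          rw [pvRowStep, hget]; simp [hdot]]
        refine ih _ _ ?_
        split_ifs <;> first
          | exact PySem.Set.nodup_add _ _ (PySem.Set.nodup_add _ _ hS)
          | exact PySem.Set.nodup_add _ _ hS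
          | exact hS

-- ---- the main simulation: A's BFS from any row state equals B's sweep ----
lemma pvLoopA_sweep (m : List String) (h w : Int) (hh : h = m.length)
    (hrows : ∀ row ∈ m, w ≤ (row.toList.length : Int)) :
    ∀ (rs : List String) (y : Nat) (n : List Int) (v s : PySem.Set (Int × Int))
      (F : PySem.Set Int) (count : Int) (fuel : Nat),
      m.drop (y + 1) = rs →
      (∀ x ∈ n, 0 ≤ x ∧ x < w) →
      (∀ x : Int, x ∈ n ↔ x ∈ F) →
      F.Nodup →
      (∀ c ∈ v, c.2 < (y : Int)) →
      (∀ c ∈ s, c.2 ≤ (y : Int)) →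
      PySem.Set.len s = count →
      2 * w.toNat * rs.length + n.length ≤ fuel →
      PySem.Set.len (pvLoopA m h w fuel (n.map (fun x => (x, (y : Int)))) v s)
        = pvSweep w rs F count := by
  intro rs
  induction rs with
  | nil =>
    intro y n v s F count fuel hdrop _ _ _ _ _ hlen _
    have hml : m.length ≤ y + 1 := by
      by_contra hcon
      have : m.drop (y + 1) ≠ [] := by
        apply List.ne_nil_of_length_pos
        rw [List.length_drop]
        omega
      exact this hdrop
    rw [pvLoopA_stop m h w fuel _ v s (by
      intro e he
      rcases List.mem_map.mp he with ⟨x, _, rfl⟩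
      simp only []
      omega)]
    rw [pvSweep]
    exact hlen
  | cons row rs' ih =>
    intro y n v s F count fuel hdrop hb hF hFnd hv hs hlen hfuel
    -- the row the BFS reads next
    have hget : m[y + 1]? = some row := by
      have h0 : (m.drop (y + 1))[0]? = some row := by rw [hdrop]; rfl
      rw [List.getElem?_drop] at h0
      simpa using h0
    have hrowget : PySem.List.pyGet? m ((y : Int) + 1) = some row := by
      have : ((y : Int) + 1) = ((y + 1 : Nat) : Int) := by push_cast; ring
      rw [this, PySem.List.pyGet?_natCast]
      exact hget
    have hrowmem : row ∈ m := by
      have : row ∈ m.drop (y + 1) := by rw [hdrop]; simp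
      exact List.mem_of_mem_drop this
    have hroww : w ≤ (row.toList.length : Int) := hrows row hrowmem
    -- split off this row's fuel
    have hnfuel : n.length ≤ fuel := by
      have := hfuel; omega
    obtain ⟨fuel', rfl⟩ : ∃ fuel', fuel = fuel' + n.length :=
      ⟨fuel - n.length, by omega⟩
    -- consume the whole queue of this row
    have hrow := pvLoopA_row m h w row (y : Int) hh hrowget hroww n [] v s fuel' hb
    rw [List.map_nil, List.append_nil] at hrow
    rw [hrow]
    -- name the row's results
    set out := (pvRowA row w (y : Int) n [] v s).1 with hout
    set v' := (pvRowA row w (y : Int) n [] v s).2.1 with hv'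
    set s' := (pvRowA row w (y : Int) n [] v s).2.2 with hs'
    set st := F.foldl (pvRowStep w row) (PySem.Set.empty, count) with hst
    have houtchar : out = (pvFresh (y : Int) n v).flatMap
        (fun x => pvTrans w (pvCell row x) x) := by
      rw [hout, pvRowA_out]
      simp
    have hfreshmem : ∀ x : Int, x ∈ pvFresh (y : Int) n v ↔ x ∈ n := by
      intro x
      rw [pvFresh_mem]
      constructor
      · exact fun hx => hx.1
      · intro hx
        refine ⟨hx, fun hmem => ?_⟩
        have := hv _ hmem
        simp at this
    -- the two frontiers coincide
    have hFperm : (pvFresh (y : Int) n v).Perm F := by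
      rw [List.perm_ext_iff_of_nodup (pvFresh_nodup _ _ _) hFnd]
      intro x
      rw [hfreshmem, hF]
    -- counts agree
    have hcount : PySem.Set.len s' = st.2 := by
      rw [hs', pvRowA_splitter_len row w (y : Int) n [] v s (by
        intro x' hx'
        have := hs _ hx'
        simp at this)]
      rw [hst, pvSweepRow_count w row hroww F PySem.Set.empty count (by
        intro x hxF
        exact hb x ((hF x).mpr hxF))]
      rw [hlen, (hFperm.filter _).length_eq]
    -- memberships agree
    have hmem : ∀ x : Int, x ∈ out ↔ x ∈ st.1 := by
      intro z
      rw [houtchar, hst, pvSweepRow_mem w row hroww F PySem.Set.empty count z (by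
        intro x hxF
        exact hb x ((hF x).mpr hxF))]
      rw [List.mem_flatMap]
      constructor
      · rintro ⟨x, hxf, hzx⟩
        exact Or.inr ⟨x, (hF x).mp ((hfreshmem x).mp hxf), hzx⟩
      · rintro (hempty | ⟨x, hxF, hzx⟩)
        · simp [PySem.Set.empty] at hempty
        · exact ⟨x, (hfreshmem x).mpr ((hF x).mpr hxF), hzx⟩
    -- bounds for the new frontier
    have hbout : ∀ x ∈ out, 0 ≤ x ∧ x < w := by
      intro z hz
      rw [houtchar, List.mem_flatMap] at hz
      obtain ⟨x, hxf, hzx⟩ := hz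
      have hxb := hb x ((hfreshmem x).mp hxf)
      exact pvTrans_bounds w x z _ hxb.1 hxb.2 hzx
    -- fuel bound for the rest
    have houtlen : out.length ≤ 2 * w.toNat := by
      rw [houtchar, List.length_flatMap]
      have h1 : (List.map (fun x => (pvTrans w (pvCell row x) x).length)
          (pvFresh (y : Int) n v)).sum ≤ (pvFresh (y : Int) n v).length * 2 := by
        have := List.sum_le_card_nsmul
          (List.map (fun x => (pvTrans w (pvCell row x) x).length) (pvFresh (y : Int) n v)) 2
          (by
            intro b hbmem
            rcases List.mem_map.mp hbmem with ⟨x, _, rfl⟩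
            exact pvTrans_length_le w x _)
        simpa [smul_eq_mul] using this
      have h2 : (pvFresh (y : Int) n v).length ≤ w.toNat :=
        pvNodup_length_le _ w (pvFresh_nodup _ _ _)
          (fun x hx => hb x ((hfreshmem x).mp hx))
      omega
    -- recurse on the remaining rows
    have hcast : (fun x : Int => (x, (y : Int) + 1)) = (fun x : Int => (x, ((y + 1 : Nat) : Int))) := by
      funext x
      push_cast
      ring_nf
    rw [hcast]
    rw [ih (y + 1) out v' s' st.1 st.2 fuel'
      (by
        have : m.drop (y + 1 + 1) = (m.drop (y + 1)).drop 1 := by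
          rw [List.drop_drop]
        rw [this, hdrop]
        rfl)
      hbout hmem
      (by rw [hst]; exact pvSweepRow_nodup w row F PySem.Set.empty count (by simp [PySem.Set.empty]))
      (by
        intro c hc
        rcases pvRowA_visited row w (y : Int) n [] v s c hc with hcv | hcy
        · have := hv c hcv; push_cast; omega
        · push_cast; omega)
      (by
        intro c hc
        rcases pvRowA_splitter_mem row w (y : Int) n [] v s c hc with hcs | hcy
        · have := hs c hcs; push_cast; omega
        · push_cast; omega)
      hcount
      (by
        simp only [List.length_cons] at hfuel
        have hdist : 2 * w.toNat * (rs'.length + 1)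
            = 2 * w.toNat * rs'.length + 2 * w.toNat := by ring
        omega)]
    rw [pvSweep]

-- ===== VERDICT (by name: the statement is the Claim_ definition above) =====
theorem process_manifold_bfs_spec : Claim_equal_process_manifold_bfs := by
  unfold Claim_equal_process_manifold_bfs
  intro manifold _ hpre
  unfold Spec_process_manifold_bfs
  obtain ⟨hne, hS, hrows⟩ := hpre
  rcases manifold with _ | ⟨row0, rest⟩
  · exact absurd rfl hne
  simp only [List.headI] at hS hrows
  have hsome : (PySem.List.index? row0.toList 'S').isSome :=
    (PySem.List.index?_isSome_iff row0.toList 'S').mpr hS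
  obtain ⟨sx, hsx⟩ := Option.isSome_iff_exists.mp hsome
  obtain ⟨hk, -, -⟩ := PySem.List.getElem_of_index?_eq_some hsx
  simp only [process_manifold_bfs, process_manifold_bfs_alt, hsx]
  have hqueue : [((sx : Int), 0)]
      = [(sx : Int)].map (fun x => (x, ((0 : Nat) : Int))) := by simp
  rw [hqueue]
  have hofl : PySem.Set.ofList [((sx : Nat) : Int)] = [((sx : Nat) : Int)] := rfl
  rw [hofl]
  refine pvLoopA_sweep (row0 :: rest) _ _ rfl
    (by
      intro row hrowm
      exact_mod_cast hrows row hrowm)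
    rest 0 [(sx : Int)] PySem.Set.empty PySem.Set.empty [(sx : Int)] 0 _
    rfl
    (by
      intro x hx
      simp at hx
      subst hx
      constructor
      · positivity
      · exact_mod_cast hk)
    (fun x => Iff.rfl)
    (by simp)
    (by simp [PySem.Set.empty])
    (by simp [PySem.Set.empty])
    rfl
    (by
      simp only [List.length_cons, List.length_nil, Int.toNat_natCast]
      nlinarith [Nat.zero_le rest.length, Nat.zero_le row0.toList.length])
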